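-- pv_equiv track=rewrite | github.com/ViktorGololobov/MyProjects | Untitled-1.py | string_delimiter
-- ===== SOURCE A (Python) =====
-- def string_delimiter(long_string):
--     count = 0
--     main_string = ''
--
--     for i in long_string:
--         count += 1
--         main_string += i
--         if count == 4:
--             main_string += ' '
--         elif count == 14:
--             main_string += ' '
--         elif count == 19:
--             main_string += ' '
--         elif count == 24:
--             main_string += ' '
--         elif count == 27:
--             main_string += ' '
--         elif count == 30:
--             main_string += ' '
--     return main_string + "*"
-- ===== SOURCE B (Python) =====
-- def string_delimiter(long_string):
--     cuts = [4, 14, 19, 24, 27, 30]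
--     pieces = []
--     prev = 0
--     for b in cuts:
--         if b <= len(long_string):
--             pieces.append(long_string[prev:b])
--             prev = b
--     pieces.append(long_string[prev:])
--     return ' '.join(pieces) + '*'
-- ===== Notes on version B (the rewrite author's own statement) =====
-- stated objective: faster
-- what changed: Replaced the per-character counter loop with chained position tests by slicing the string at the fixed cut positions that fit and joining the segments with spaces.
import Mathlib
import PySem

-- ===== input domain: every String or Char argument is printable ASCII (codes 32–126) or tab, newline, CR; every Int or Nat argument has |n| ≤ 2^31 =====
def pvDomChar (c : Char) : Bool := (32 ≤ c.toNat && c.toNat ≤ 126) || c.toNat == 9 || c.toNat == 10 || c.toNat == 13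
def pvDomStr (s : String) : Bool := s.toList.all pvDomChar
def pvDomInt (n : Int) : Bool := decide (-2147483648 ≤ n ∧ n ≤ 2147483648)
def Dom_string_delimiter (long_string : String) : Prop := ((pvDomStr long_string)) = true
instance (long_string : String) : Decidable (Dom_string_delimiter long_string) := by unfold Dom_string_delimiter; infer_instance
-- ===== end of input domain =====

-- B replaces A's per-character counter loop by slicing at the fixed cut positions and joining with
-- spaces; a timing run measured B faster by a constant factor (bulk slices/join vs per-char appends).

-- ===== PORT A =====
-- literal transliteration of A's counter loop (string accumulated as List Char, per PySem convention)
def string_delimiter (long_string : String) : String :=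
  let st := long_string.toList.foldl (fun (st : Int × List Char) (i : Char) =>
    let count := st.1 + 1
    let main := st.2 ++ [i]
    let main :=
      if count = 4 then main ++ [' ']
      else if count = 14 then main ++ [' ']
      else if count = 19 then main ++ [' ']
      else if count = 24 then main ++ [' ']
      else if count = 27 then main ++ [' ']
      else if count = 30 then main ++ [' ']
      else main
    (count, main)) (0, [])
  String.mk (st.2 ++ ['*'])

-- ===== PORT B =====
def bCuts : List Nat := [4, 14, 19, 24, 27, 30]

def string_delimiter_alt (long_string : String) : String :=
  let l := long_string.toList
  let n := l.length
  let st := bCuts.foldl (fun (st : Nat × List (List Char)) (b : Nat) =>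
    if b ≤ n then (b, st.2 ++ [PySem.List.slice l (some (st.1 : Int)) (some (b : Int))])
    else st) (0, [])
  let pieces := st.2 ++ [PySem.List.slice l (some (st.1 : Int)) none]
  String.mk (PySem.Chars.join [' '] pieces ++ ['*'])

-- ===== PRECONDITION & SPEC =====
def Spec_string_delimiter (long_string : String) (out : String) : Prop := out = string_delimiter_alt long_string
instance (long_string : String) (out : String) : Decidable (Spec_string_delimiter long_string out) := by unfold Spec_string_delimiter; infer_instance

-- ===== CLAIM (what is proved, stated in full; the proofs are below) =====
def Claim_equal_string_delimiter : Prop := ∀ (long_string : String), Dom_string_delimiter long_string → Spec_string_delimiter long_string (string_delimiter long_string)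

-- ===== LEMMAS AND PROOFS =====

-- the loop body of A's fold, named (definitionally equal to the lambda in the port)
def stepA (st : Int × List Char) (i : Char) : Int × List Char :=
  (st.1 + 1,
   if st.1 + 1 = 4 then st.2 ++ [i] ++ [' ']
   else if st.1 + 1 = 14 then st.2 ++ [i] ++ [' ']
   else if st.1 + 1 = 19 then st.2 ++ [i] ++ [' ']
   else if st.1 + 1 = 24 then st.2 ++ [i] ++ [' ']
   else if st.1 + 1 = 27 then st.2 ++ [i] ++ [' ']
   else if st.1 + 1 = 30 then st.2 ++ [i] ++ [' ']
   else st.2 ++ [i])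

-- the loop body of B's fold, named (definitionally equal to the lambda in the port)
def stepB (l : List Char) (st : Nat × List (List Char)) (b : Nat) : Nat × List (List Char) :=
  if b ≤ l.length then (b, st.2 ++ [PySem.List.slice l (some (st.1 : Int)) (some (b : Int))])
  else st

-- goA ks k l copies l, inserting a space after each absolute position in ks (head-checked)
def goA : List Nat → Nat → List Char → List Char
  | _, _, [] => []
  | [], k, c :: t => c :: goA [] (k+1) t
  | b :: ks', k, c :: t =>
      if k + 1 = b then c :: ' ' :: goA ks' (k+1) t
      else c :: goA (b :: ks') (k+1) t

-- segments of l cut at the positions of ks that are ≤ l.length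
def segsOf (l : List Char) : List Nat → Nat → List (List Char)
  | [], prev => [l.drop prev]
  | b :: ks', prev =>
    if b ≤ l.length then ((l.drop prev).take (b - prev)) :: segsOf l ks' b
    else segsOf l ks' prev

theorem segsOf_ne_nil (l : List Char) (ks : List Nat) (prev : Nat) : segsOf l ks prev ≠ [] := by
  induction ks generalizing prev with
  | nil => simp [segsOf]
  | cons b ks' ih => simp only [segsOf]; split <;> simp [ih]

theorem goA_nil_eq (ks : List Nat) (k : Nat) : goA ks k [] = [] := by
  cases ks <;> rfl

theorem goA_big (ks : List Nat) (k : Nat) (t : List Char)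
    (h : ∀ b ∈ ks, k + t.length < b) : goA ks k t = t := by
  induction t generalizing k ks with
  | nil => exact goA_nil_eq ks k
  | cons c t ih =>
    cases ks with
    | nil => simp [goA, ih [] (k+1) (by simp)]
    | cons b ks' =>
      have hb := h b (by simp)
      simp only [List.length_cons] at hb
      rw [goA, if_neg (by omega), ih (b :: ks') (k+1)]
      intro b' hb'
      have := h b' hb'
      simp only [List.length_cons] at this
      omega

theorem goA_cut (ks' : List Nat) (d k : Nat) (t : List Char)
    (hd : 0 < d) (hle : d ≤ t.length) :
    goA ((k + d) :: ks') k t = t.take d ++ ' ' :: goA ks' (k + d) (t.drop d) := by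
  induction d generalizing k t with
  | zero => omega
  | succ d ih =>
    cases t with
    | nil => simp at hle
    | cons c t =>
      by_cases hd0 : d = 0
      · subst hd0; simp [goA]
      · rw [goA, if_neg (by omega), show k + (d + 1) = (k + 1) + d from by omega,
            ih (k+1) t (by omega) (by simpa using Nat.le_of_succ_le_succ hle)]
        simp

-- the chain of ifs in stepA, as a single membership test
theorem stepA_eq (k : Nat) (acc : List Char) (c : Char) :
    stepA ((k : Int), acc) c
      = (((k + 1 : Nat) : Int),
         if (k + 1) ∈ bCuts then acc ++ [c] ++ [' '] else acc ++ [c]) := by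
  have hC : ((k : Int) + 1 = 4 ∨ (k : Int) + 1 = 14 ∨ (k : Int) + 1 = 19 ∨
      (k : Int) + 1 = 24 ∨ (k : Int) + 1 = 27 ∨ (k : Int) + 1 = 30) ↔ (k + 1) ∈ bCuts := by
    simp [bCuts]; omega
  simp only [stepA, Prod.mk.injEq]
  refine ⟨by push_cast; ring, ?_⟩
  split_ifs <;> tauto

-- the A-side loop computes goA, under the invariant that ks is exactly the cuts still ahead
theorem loopA (l : List Char) (k : Nat) (acc : List Char) (ks : List Nat)
    (hpw : List.Pairwise (· < ·) ks)
    (hgt : ∀ b ∈ ks, k < b)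
    (hmem : ∀ b ∈ bCuts, k < b → b ∈ ks)
    (hsub : ∀ b ∈ ks, b ∈ bCuts) :
    (l.foldl stepA ((k : Int), acc)).2 = acc ++ goA ks k l := by
  induction l generalizing k acc ks with
  | nil => simp [goA_nil_eq]
  | cons c t ih =>
    rw [List.foldl_cons, stepA_eq k acc c]
    by_cases hmem1 : (k + 1) ∈ bCuts
    · have hks : k + 1 ∈ ks := hmem _ hmem1 (by omega)
      cases ks with
      | nil => simp at hks
      | cons b ks' =>
        have hb : b = k + 1 := by
          rcases List.mem_cons.mp hks with h | h
          · omega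
          · have h1 := (List.pairwise_cons.mp hpw).1 _ h
            have h2 := hgt b (by simp)
            omega
        rw [if_pos hmem1, goA, if_pos hb.symm]
        rw [ih (k+1) (acc ++ [c] ++ [' ']) ks' (List.pairwise_cons.mp hpw).2
            (fun b' hb' => by have := (List.pairwise_cons.mp hpw).1 _ hb'; omega)
            (fun b' hb' hk' => by
              rcases List.mem_cons.mp (hmem b' hb' (by omega)) with h | h
              · omega
              · exact h)
            (fun b' hb' => hsub b' (by simp [hb']))]
        simp
    · rw [if_neg hmem1]
      have hne : ∀ b' ∈ ks, b' ≠ k + 1 := fun b' hb' h => hmem1 (h ▸ hsub b' hb')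
      cases ks with
      | nil =>
        rw [goA, ih (k+1) (acc ++ [c]) [] (by simp) (by simp)
            (fun b' hb' hk' => by simpa using hmem b' hb' (by omega))
            (by simp)]
        simp
      | cons b ks' =>
        have hbne : k + 1 ≠ b := fun h => (hne b (by simp)) h.symm
        rw [goA, if_neg hbne]
        rw [ih (k+1) (acc ++ [c]) (b :: ks') hpw
            (fun b' hb' => by have := hgt b' hb'; have := hne b' hb'; omega)
            (fun b' hb' hk' => hmem b' hb' (by omega))
            hsub]
        simp

-- the B-side loop computes segsOf
theorem loopB (l : List Char) (ks : List Nat) (prev : Nat) (pieces : List (List Char)) :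
    (ks.foldl (stepB l) (prev, pieces)).2
      ++ [PySem.List.slice l (some (((ks.foldl (stepB l) (prev, pieces)).1 : Nat) : Int)) none]
      = pieces ++ segsOf l ks prev := by
  induction ks generalizing prev pieces with
  | nil => simp [segsOf, PySem.List.slice_from_natCast]
  | cons b ks' ih =>
    have hstep : stepB l (prev, pieces) b
        = if b ≤ l.length
          then (b, pieces ++ [PySem.List.slice l (some (prev : Int)) (some (b : Int))])
          else (prev, pieces) := by
      simp [stepB]
    rw [List.foldl_cons, hstep]
    simp only [segsOf]
    by_cases hb : b ≤ l.length
    · rw [if_pos hb, if_pos hb,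
          ih b (pieces ++ [PySem.List.slice l (some (prev : Int)) (some (b : Int))]),
          PySem.List.slice_natCast]
      simp
    · rw [if_neg hb, if_neg hb]
      exact ih prev pieces

-- joined segments equal the annotated copy
theorem join_segs (l : List Char) (ks : List Nat) (prev : Nat)
    (hpw : List.Pairwise (· < ·) ks)
    (hgt : ∀ b ∈ ks, prev < b)
    (hle : prev ≤ l.length) :
    PySem.Chars.join [' '] (segsOf l ks prev) = goA ks prev (l.drop prev) := by
  induction ks generalizing prev with
  | nil => simp [segsOf, PySem.Chars.join_singleton, goA_big]
  | cons b ks' ih =>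
    have hpb : prev < b := hgt b (by simp)
    by_cases hb : b ≤ l.length
    · rw [segsOf, if_pos hb]
      obtain ⟨x, xs, hx⟩ := List.exists_cons_of_ne_nil (segsOf_ne_nil l ks' b)
      rw [hx, PySem.Chars.join_cons_cons, ← hx,
          ih b (List.pairwise_cons.mp hpw).2
            (fun b' hb' => (List.pairwise_cons.mp hpw).1 _ hb') hb]
      have hcut := goA_cut ks' (b - prev) prev (l.drop prev) (by omega)
        (by simp; omega)
      rw [show prev + (b - prev) = b from by omega] at hcut
      rw [hcut, List.drop_drop, show prev + (b - prev) = b from by omega]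
      simp
    · rw [segsOf, if_neg hb,
          ih prev (List.pairwise_cons.mp hpw).2
            (fun b' hb' => hgt b' (by simp [hb'])) hle]
      have hlen : (l.drop prev).length = l.length - prev := by simp
      rw [goA_big ks' prev _ (fun b' hb' => by
            have h1 := (List.pairwise_cons.mp hpw).1 _ hb'
            rw [hlen]; omega),
          goA_big (b :: ks') prev _ (fun b' hb' => by
            rcases List.mem_cons.mp hb' with h | h
            · rw [hlen]; omega
            · have h1 := (List.pairwise_cons.mp hpw).1 _ h
              rw [hlen]; omega)]

-- ===== VERDICT (by name: the statement is the Claim_ definition above) =====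
theorem string_delimiter_spec : Claim_equal_string_delimiter := by
  intro s _
  unfold Spec_string_delimiter
  have eA : string_delimiter s
      = String.mk ((s.toList.foldl stepA (0, [])).2 ++ ['*']) := rfl
  have eB : string_delimiter_alt s
      = String.mk (PySem.Chars.join [' ']
          ((bCuts.foldl (stepB s.toList) (0, [])).2
            ++ [PySem.List.slice s.toList
                  (some (((bCuts.foldl (stepB s.toList) (0, [])).1 : Nat) : Int)) none])
          ++ ['*']) := rfl
  rw [eA, eB]
  have hA := loopA s.toList 0 [] bCuts (by decide) (by decide) (fun b hb _ => hb)
    (fun b hb => hb)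
  rw [Nat.cast_zero] at hA
  rw [hA, loopB s.toList bCuts 0 []]
  simp only [List.nil_append]
  rw [join_segs s.toList bCuts 0 (by decide) (by decide) (by omega)]
  simp
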